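-- pv_equiv track=rewrite | github.com/hopar96/algorithm_problem_solve | 프로그래머스/2/258711. 도넛과 막대 그래프/도넛과 막대 그래프.py | solution
-- ===== SOURCE A (Python) =====
-- from collections import deque
--
-- def solution(edges):
--     answer = [0,0,0,0]
--
--     not_first_vertexes = set()
--     first_vertexes = []
--     edge_dict = {}
--     for edge in edges:
--         not_first_vertexes.add(edge[1])
--         if edge[0] in edge_dict:
--             edge_dict[edge[0]].append(edge[1])
--         else:
--             edge_dict[edge[0]] = [edge[1]]
--
--     for key in edge_dict.keys():
--         if len(edge_dict[key]) > 1 and not key in not_first_vertexes: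
--             first_vertexes.append(key)
--
--     answer[0] = first_vertexes[0]
--     first_vertex = first_vertexes[0]
--     start_vertexes = edge_dict[first_vertex]
--     del edge_dict[first_vertex]
--
--     for start_vertex in start_vertexes:
--         vertex_set = set()
--         vertex_set.add(start_vertex)
--         edge_cnt = 0
--         que = deque()
--         que.append(start_vertex)
--
--         while que:
--             _vertex = que.popleft()
--             vertex_set.add(_vertex)
--             if _vertex in edge_dict and len(edge_dict[_vertex]) > 0:
--                 for _v in edge_dict[_vertex]:
--                     que.append(_v)
--                     edge_cnt += 1
--                 del edge_dict[_vertex]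
--
--         if len(vertex_set) == edge_cnt:
--             answer[1] += 1
--         elif len(vertex_set) > edge_cnt:
--             answer[2] += 1
--         else:
--             answer[3] += 1
--
--
--     return answer
-- ===== SOURCE B (Python) =====
-- def solution(edges):
--     # Frontier-set fixpoint instead of a queue BFS: reachability is computed by repeated
--     # whole-frontier set-image over a read-only adjacency dict; the edge count is then
--     # derived arithmetically from the reached set and the consumed keys are pruned in one batch.
--     out = {}
--     targets = set()
--     for e in edges:
--         a, b = e[0], e[1]
--         targets.add(b)
--         out.setdefault(a, []).append(b)
--     gen = next(k for k, vs in out.items() if len(vs) > 1 and k not in targets)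
--     starts = out.pop(gen)
--     counts = [0, 0, 0]
--     for s in starts:
--         reach = {s}
--         frontier = {s}
--         while frontier:
--             frontier = {w for v in frontier if v in out for w in out[v]} - reach
--             reach |= frontier
--         consumed = [v for v in reach if v in out]
--         cnt = sum(len(out[v]) for v in consumed)
--         for v in consumed:
--             del out[v]
--         diff = len(reach) - cnt
--         counts[0 if diff == 0 else (1 if diff > 0 else 2)] += 1
--     return [gen] + counts
-- ===== Notes on version B (the rewrite author's own statement) =====
-- stated objective: alternative
-- what changed: B computes each component's reachable set by a whole-frontier set-image fixpoint (no queue, no per-vertex pops, adjacency dict read-only during the search), then derives the edge count arithmetically as the sum of out-degrees over the reached keys and prunes those keys in one batch, whereas A runs a consuming vertex-at-a-time BFS that counts edges and deletes dict entries as it traverses; B also picks the generated vertex lazily with next().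
import Mathlib
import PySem

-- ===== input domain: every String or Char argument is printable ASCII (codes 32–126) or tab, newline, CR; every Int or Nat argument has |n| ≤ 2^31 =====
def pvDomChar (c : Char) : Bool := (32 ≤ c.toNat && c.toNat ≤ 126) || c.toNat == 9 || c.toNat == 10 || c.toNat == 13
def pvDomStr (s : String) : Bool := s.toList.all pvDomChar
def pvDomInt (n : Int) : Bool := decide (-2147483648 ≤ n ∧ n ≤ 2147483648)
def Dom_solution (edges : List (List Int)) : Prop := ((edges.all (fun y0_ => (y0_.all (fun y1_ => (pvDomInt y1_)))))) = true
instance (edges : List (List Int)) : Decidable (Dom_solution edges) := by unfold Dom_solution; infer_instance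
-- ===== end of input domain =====

-- B replaces A's consuming vertex-at-a-time BFS (deque, per-edge counter, delete-during-scan) by a
-- whole-frontier set-image fixpoint over a read-only adjacency dict, deriving the edge count
-- arithmetically from the reached set afterwards and pruning the consumed keys in one batch
-- (return value only; neither program mutates its argument).

-- edge[0] / edge[1]; Pre_solution guarantees every edge has length ≥ 2, so pyGet? is some there
def pvE0 (e : List Int) : Int := (PySem.List.pyGet? e 0).getD 0
def pvE1 (e : List Int) : Int := (PySem.List.pyGet? e 1).getD 0

-- measure used for termination of A's traversal loop
def pvDictW (d : PySem.Dict Int (List Int)) : Nat :=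
  (d.items.map (fun p => p.2.length + 1)).sum

lemma pvDictW_erase_le (d : PySem.Dict Int (List Int)) (v : Int) :
    pvDictW (d.erase v) ≤ pvDictW d :=
  List.Sublist.sum_le_sum (List.Sublist.map _ (List.filter_sublist)) (by simp)

lemma pvDictW_erase_get? (d : PySem.Dict Int (List Int)) (v : Int) (ch : List Int)
    (h : d.get? v = some ch) : pvDictW (d.erase v) + ch.length + 1 ≤ pvDictW d := by
  obtain ⟨l⟩ := d
  induction l with
  | nil => simp [PySem.Dict.get?] at h
  | cons p t ih =>
    simp only [PySem.Dict.get?, List.find?_cons] at h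
    have hle : pvDictW (PySem.Dict.erase ⟨t⟩ v) ≤ pvDictW (⟨t⟩ : PySem.Dict Int (List Int)) :=
      pvDictW_erase_le _ _
    by_cases hp : p.1 == v
    · simp only [hp, Option.map_some, Option.some.injEq] at h
      subst h
      simp only [pvDictW, PySem.Dict.erase, PySem.Dict.items, List.filter_cons, hp,
        Bool.not_true, Bool.false_eq_true, if_false, List.map_cons, List.sum_cons] at *
      omega
    · simp only [hp] at h
      have := ih (by simpa [PySem.Dict.get?] using h)
      simp only [pvDictW, PySem.Dict.erase, PySem.Dict.items, List.filter_cons, hp,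
        Bool.not_false, if_true, List.map_cons, List.sum_cons] at *
      omega

lemma pvGetD_ne_nil_get? (d : PySem.Dict Int (List Int)) (v : Int)
    (h : d.getD v [] ≠ []) : d.get? v = some (d.getD v []) := by
  unfold PySem.Dict.getD at *
  cases hg : d.get? v with
  | none => simp [hg] at h
  | some l => simp [hg]

-- ===== PORT A =====
-- first loop of A: builds (not_first_vertexes, edge_dict)
def pvBuildA (edges : List (List Int)) : PySem.Set Int × PySem.Dict Int (List Int) :=
  edges.foldl (fun st e =>
    (PySem.Set.add st.1 (pvE1 e),
     match st.2.get? (pvE0 e) with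
     | some l => st.2.insert (pvE0 e) (l ++ [pvE1 e])
     | none   => st.2.insert (pvE0 e) [pvE1 e]))
    (PySem.Set.empty, PySem.Dict.empty)

-- A's inner while-loop over the deque (pop from the FRONT, append children at the end)
def pvBfsA (que : List Int) (seen : PySem.Set Int) (d : PySem.Dict Int (List Int)) (cnt : Int) :
    PySem.Set Int × PySem.Dict Int (List Int) × Int :=
  match que with
  | [] => (seen, d, cnt)
  | v :: rest =>
    -- `_vertex in edge_dict and len(edge_dict[_vertex]) > 0` ⟺ d.getD v [] ≠ []
    if d.getD v [] = [] then
      pvBfsA rest (PySem.Set.add seen v) d cnt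
    else
      pvBfsA (rest ++ d.getD v []) (PySem.Set.add seen v) (d.erase v)
        (cnt + (d.getD v []).length)
termination_by que.length + pvDictW d
decreasing_by
  all_goals simp
  all_goals (have := pvDictW_erase_get? d v (d.getD v []) (pvGetD_ne_nil_get? d v (by assumption)); omega)

-- one step of A's `for start_vertex in start_vertexes` loop (answer[1..3] as a triple)
def pvStepA (st : (Int × Int × Int) × PySem.Dict Int (List Int)) (s : Int) :
    (Int × Int × Int) × PySem.Dict Int (List Int) :=
  let r := pvBfsA [s] (PySem.Set.add PySem.Set.empty s) st.2 0
  let lenV : Int := (PySem.Set.len r.1 : Int)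
  let cnt : Int := r.2.2
  (if lenV = cnt then (st.1.1 + 1, st.1.2.1, st.1.2.2)
   else if lenV > cnt then (st.1.1, st.1.2.1 + 1, st.1.2.2)
   else (st.1.1, st.1.2.1, st.1.2.2 + 1), r.2.1)

def solution (edges : List (List Int)) : List Int :=
  let built := pvBuildA edges
  let notFirst := built.1
  let d0 := built.2
  let firsts := d0.keys.filter
    (fun k => decide (1 < (d0.getD k []).length) && !(PySem.Set.contains notFirst k))
  match firsts with
  | [] => []   -- Python: `first_vertexes[0]` raises IndexError here; excluded by Pre_solution
  | fv :: _ =>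
    let starts := d0.getD fv []
    let d1 := d0.erase fv
    let r := starts.foldl pvStepA ((0, 0, 0), d1)
    [fv, r.1.1, r.1.2.1, r.1.2.2]

-- ===== PORT B =====
-- B's build loop: `targets.add(b); out.setdefault(a, []).append(b)`
def pvBuildB (edges : List (List Int)) : PySem.Set Int × PySem.Dict Int (List Int) :=
  edges.foldl (fun st e =>
    (PySem.Set.add st.1 (pvE1 e),
     PySem.Dict.modify st.2 (pvE0 e) [] (· ++ [pvE1 e])))
    (PySem.Set.empty, PySem.Dict.empty)

-- the set comprehension `{w for v in frontier if v in out for w in out[v]}`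
def pvChildSet (F : List Int) (d : PySem.Dict Int (List Int)) : PySem.Set Int :=
  F.foldl (fun acc v =>
    match d.get? v with
    | some ch => PySem.Set.update acc ch
    | none => acc) PySem.Set.empty

-- termination measure for B's fixpoint loop: value-occurrences of d not yet reached
def pvSatW (R : List Int) (d : PySem.Dict Int (List Int)) : Nat :=
  ((d.items.flatMap (fun p => p.2)).filter (fun x => !(List.contains R x))).length

lemma pvChildSet_nodup_aux (F : List Int) (d : PySem.Dict Int (List Int)) :
    ∀ (acc : PySem.Set Int), acc.Nodup →
      (F.foldl (fun acc v =>
        match d.get? v with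
        | some ch => PySem.Set.update acc ch
        | none => acc) acc).Nodup := by
  induction F with
  | nil => intro acc h; simpa using h
  | cons v F ih =>
    intro acc h
    rw [List.foldl_cons]
    cases hv : d.get? v with
    | some ch =>
      simp only [hv]
      exact ih _ (PySem.Set.nodup_update _ _ h)
    | none =>
      simp only [hv]
      exact ih _ h

lemma pvChildSet_nodup (F : List Int) (d : PySem.Dict Int (List Int)) :
    (pvChildSet F d).Nodup :=
  pvChildSet_nodup_aux F d PySem.Set.empty (by simp [PySem.Set.empty])

lemma pvChildSet_mem_aux (F : List Int) (d : PySem.Dict Int (List Int)) :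
    ∀ (acc : PySem.Set Int) (x : Int),
      x ∈ (F.foldl (fun acc v =>
        match d.get? v with
        | some ch => PySem.Set.update acc ch
        | none => acc) acc) ↔ x ∈ acc ∨ ∃ v ∈ F, x ∈ d.getD v [] := by
  induction F with
  | nil => intro acc x; simp
  | cons v F ih =>
    intro acc x
    rw [List.foldl_cons]
    cases hv : d.get? v with
    | some ch =>
      simp only [hv]
      rw [ih]
      simp [PySem.Set.mem_update, PySem.Dict.getD, hv, or_assoc]
    | none =>
      simp only [hv]
      rw [ih]
      simp [PySem.Dict.getD, hv]

lemma mem_pvChildSet (F : List Int) (d : PySem.Dict Int (List Int)) (x : Int) :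
    x ∈ pvChildSet F d ↔ ∃ v ∈ F, x ∈ d.getD v [] := by
  rw [pvChildSet, pvChildSet_mem_aux]
  simp [PySem.Set.empty]

lemma pvGet?_mem (d : PySem.Dict Int (List Int)) (v : Int) (ch : List Int)
    (h : d.get? v = some ch) : (v, ch) ∈ d.items := by
  simp only [PySem.Dict.get?] at h
  cases hf : List.find? (fun p => p.1 == v) d.items with
  | none => simp [hf] at h
  | some p =>
    have h1 := List.find?_some hf
    have h2 := List.mem_of_find?_eq_some hf
    simp [hf] at h
    simp at h1
    have : p = (v, ch) := by
      cases p; simp_all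
    rw [this] at h2
    exact h2

lemma pvChildSet_sub_values (F : List Int) (d : PySem.Dict Int (List Int)) (x : Int)
    (h : x ∈ pvChildSet F d) : x ∈ d.items.flatMap (fun p => p.2) := by
  rw [mem_pvChildSet] at h
  obtain ⟨v, _, hx⟩ := h
  have hne : d.getD v [] ≠ [] := by
    intro h0; rw [h0] at hx; simp at hx
  have hg := pvGetD_ne_nil_get? d v hne
  have := pvGet?_mem d v _ hg
  exact List.mem_flatMap.mpr ⟨(v, d.getD v []), this, hx⟩

-- key decrease fact for the fixpoint loop
lemma pvSatW_key (R : List Int) (d : PySem.Dict Int (List Int)) (new : List Int)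
    (hnd : new.Nodup)
    (hmem : ∀ x ∈ new, x ∈ d.items.flatMap (fun p => p.2) ∧ x ∉ R) :
    pvSatW (PySem.Set.update R new) d + new.length ≤ pvSatW R d := by
  unfold pvSatW
  set L := d.items.flatMap (fun p => p.2) with hL
  have hfilt : L.filter (fun x => !(List.contains (PySem.Set.update R new) x))
      = (L.filter (fun x => !(List.contains R x))).filter (fun x => !(List.contains new x)) := by
    rw [List.filter_filter]
    apply List.filter_congr
    intro x _
    by_cases hR : x ∈ R <;> by_cases hN : x ∈ new <;>
      simp [List.contains_eq_mem, PySem.Set.mem_update, hR, hN]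
  set M := L.filter (fun x => !(List.contains R x)) with hM
  have hsub : new ⊆ M.filter (fun x => List.contains new x) := by
    intro x hx
    have hxL : x ∈ L := (hmem x hx).1
    have hxR : x ∉ R := (hmem x hx).2
    refine List.mem_filter.mpr ⟨List.mem_filter.mpr ⟨hxL, ?_⟩, ?_⟩ <;>
      simp [List.contains_eq_mem, hxR, hx]
  have hlen : new.length ≤ (M.filter (fun x => List.contains new x)).length :=
    (hnd.subperm hsub).length_le
  have hsplit := List.length_eq_countP_add_countP (fun x => !(List.contains new x)) (l := M)
  rw [List.countP_eq_length_filter, List.countP_eq_length_filter] at hsplit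
  have hnn : (M.filter (fun a => decide ¬((!(List.contains new a)) = true))).length
      = (M.filter (fun x => List.contains new x)).length := by
    congr 1
    apply List.filter_congr
    intro x _
    by_cases h : x ∈ new <;> simp [List.contains_eq_mem, h]
  rw [hfilt]
  omega

def pvSat (F R : PySem.Set Int) (d : PySem.Dict Int (List Int)) : PySem.Set Int :=
  match F with
  | [] => R
  | _ :: _ =>
    let new := PySem.Set.diff (pvChildSet F d) R
    pvSat new (PySem.Set.update R new) d
termination_by 2 * pvSatW R d + F.length
decreasing_by
  have hnd : (PySem.Set.diff (pvChildSet F d) R).Nodup :=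
    PySem.Set.nodup_diff _ _ (pvChildSet_nodup F d)
  have hmem : ∀ x ∈ PySem.Set.diff (pvChildSet F d) R,
      x ∈ d.items.flatMap (fun p => p.2) ∧ x ∉ R := by
    intro x hx
    have := (PySem.Set.mem_diff _ _ _).mp hx
    exact ⟨pvChildSet_sub_values F d x this.1, this.2⟩
  have := pvSatW_key R d _ hnd hmem
  simp only [List.length_cons]
  omega

-- one step of B's `for s in starts` loop; counts is the list [donut, bar, eight]
def pvStepB (st : List Int × PySem.Dict Int (List Int)) (s : Int) :
    List Int × PySem.Dict Int (List Int) :=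
  let reach := pvSat (PySem.Set.ofList [s]) (PySem.Set.ofList [s]) st.2
  let consumed := reach.filter (fun v => st.2.contains v)
  let cnt : Int := (consumed.map (fun v => ((st.2.getD v []).length : Int))).sum
  let d' := consumed.foldl (fun d v => d.erase v) st.2
  let diff : Int := (PySem.Set.len reach : Int) - cnt
  let idx : Nat := if diff = 0 then 0 else if diff > 0 then 1 else 2
  (st.1.set idx (st.1.getD idx 0 + 1), d')

def solution_alt (edges : List (List Int)) : List Int :=
  let built := pvBuildB edges
  let targets := built.1
  let out := built.2
  -- `next(k for k, vs in out.items() if len(vs) > 1 and k not in targets)`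
  match out.items.find?
      (fun p => decide (1 < p.2.length) && !(PySem.Set.contains targets p.1)) with
  | none => []   -- Python: `next(...)` raises StopIteration here; excluded by Pre_solution
  | some p =>
    let gen := p.1
    let starts := out.getD gen []   -- `out.pop(gen)`
    let d1 := out.erase gen
    let r := starts.foldl pvStepB ([0, 0, 0], d1)
    gen :: r.1

-- ===== PRECONDITION & SPEC =====
-- Pre_solution excludes exactly the inputs where A raises: an edge shorter than 2 entries
-- (IndexError on edge[0]/edge[1]) or no generated vertex, i.e. no vertex that heads at least
-- two edges and is the target of none (IndexError on first_vertexes[0]).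
def Pre_solution (edges : List (List Int)) : Prop :=
  (∀ e ∈ edges, 2 ≤ e.length) ∧
  ∃ e ∈ edges, 2 ≤ (edges.countP (fun f => pvE0 f = pvE0 e)) ∧ ∀ f ∈ edges, pvE1 f ≠ pvE0 e
instance (edges : List (List Int)) : Decidable (Pre_solution edges) := by
  unfold Pre_solution; infer_instance

def pvWitness_solution : List (List Int) := [[0, 1], [0, 2], [2, 3]]

def Spec_solution (edges : List (List Int)) (out : List Int) : Prop := out = solution_alt edges
instance (edges : List (List Int)) (out : List Int) : Decidable (Spec_solution edges out) := by
  unfold Spec_solution; infer_instance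

-- ===== CLAIM (what is proved, stated in full; the proofs are below) =====
def Claim_equal_solution : Prop :=
  ∀ (edges : List (List Int)), Dom_solution edges → Pre_solution edges →
    Spec_solution edges (solution edges)

-- ===== LEMMAS AND PROOFS =====

-- result relation: the seen-sets are permutations, dict and edge count coincide
def pvSR (a b : PySem.Set Int × PySem.Dict Int (List Int) × Int) : Prop :=
  a.1.Perm b.1 ∧ a.2 = b.2

lemma pvSR_trans {a b c : PySem.Set Int × PySem.Dict Int (List Int) × Int}
    (h1 : pvSR a b) (h2 : pvSR b c) : pvSR a c :=
  ⟨h1.1.trans h2.1, h1.2.trans h2.2⟩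

lemma pvAppPair_perm (s : List Int) (x y : Int) :
    (s ++ [x, y]).Perm (s ++ [y, x]) :=
  List.Perm.append_left s (List.Perm.swap y x [])

lemma pvSet_add_perm {s s' : PySem.Set Int} (h : s.Perm s') (x : Int) :
    (PySem.Set.add s x).Perm (PySem.Set.add s' x) := by
  by_cases hc : x ∈ s'
  · simpa [PySem.Set.add, PySem.Set.contains, List.contains_eq_mem, hc, h.mem_iff] using h
  · have := h.append_right [x]
    simpa [PySem.Set.add, PySem.Set.contains, List.contains_eq_mem, hc, h.mem_iff] using this

lemma pvSet_add_add_perm (s : PySem.Set Int) (x y : Int) :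
    ((PySem.Set.add s x).add y).Perm ((PySem.Set.add s y).add x) := by
  by_cases hxy : x = y
  · subst hxy; exact List.Perm.refl _
  · by_cases hx : x ∈ s <;> by_cases hy : y ∈ s <;>
      simp [PySem.Set.add, PySem.Set.contains, List.contains_eq_mem, hx, hy, hxy,
        Ne.symm hxy, List.mem_append]
    exact pvAppPair_perm s x y

lemma pvGet?_erase_ne (d : PySem.Dict Int (List Int)) (v y : Int) (h : y ≠ v) :
    (d.erase v).get? y = d.get? y := by
  simp only [PySem.Dict.erase, PySem.Dict.get?, PySem.Dict.items]
  obtain ⟨l⟩ := d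
  induction l with
  | nil => rfl
  | cons p t ih =>
    simp only [List.filter_cons, List.find?_cons]
    by_cases hp : (p.1 == v) = true
    · have hpy : (p.1 == y) = false := by
        simp at hp ⊢; omega
      simp only [hp, Bool.not_true, Bool.false_eq_true, if_false, hpy, cond_false]
      simpa using ih
    · simp only [hp, Bool.not_false, if_true, List.find?_cons]
      by_cases hpy : (p.1 == y) = true
      · simp [hpy]
      · simp only [hpy, cond_false]
        simpa using ih

lemma pvGet?_erase_self (d : PySem.Dict Int (List Int)) (v : Int) :
    (d.erase v).get? v = none := by
  simp only [PySem.Dict.erase, PySem.Dict.get?, PySem.Dict.items]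
  obtain ⟨l⟩ := d
  induction l with
  | nil => rfl
  | cons p t ih =>
    simp only [List.filter_cons]
    by_cases hp : (p.1 == v) = true
    · simpa [hp] using ih
    · simp only [hp, Bool.not_false, if_true, List.find?_cons, hp, cond_false]
      simpa using ih

lemma pvErase_of_none (d : PySem.Dict Int (List Int)) (v : Int)
    (h : d.get? v = none) : d.erase v = d := by
  apply PySem.Dict.ext
  simp only [PySem.Dict.erase, PySem.Dict.items]
  obtain ⟨l⟩ := d
  induction l with
  | nil => rfl
  | cons p t ih =>
    simp only [PySem.Dict.get?, PySem.Dict.items, List.find?_cons] at h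
    by_cases hp : (p.1 == v) = true
    · simp [hp] at h
    · simp only [List.filter_cons, hp, Bool.not_false, if_true, List.cons.injEq, true_and]
      exact ih (by simpa [PySem.Dict.get?, PySem.Dict.items, hp] using h)

lemma pvHne_erase (d : PySem.Dict Int (List Int)) (v : Int)
    (h : ∀ p ∈ d.items, p.2 ≠ []) : ∀ p ∈ (d.erase v).items, p.2 ≠ [] := by
  intro p hp
  exact h p (List.mem_filter.mp hp).1

lemma pvGetD_erase_ne (d : PySem.Dict Int (List Int)) (v y : Int) (h : y ≠ v) :
    (d.erase v).getD y [] = d.getD y [] := by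
  simp [PySem.Dict.getD, pvGet?_erase_ne d v y h]

lemma pvErase_comm (d : PySem.Dict Int (List Int)) (x y : Int) :
    (d.erase x).erase y = (d.erase y).erase x := by
  simp only [PySem.Dict.erase, PySem.Dict.items, List.filter_filter]
  congr 1
  apply List.filter_congr
  intro p _
  exact Bool.and_comm _ _

lemma pvApp_perm (l a b : List Int) : ((l ++ a) ++ b).Perm ((l ++ b) ++ a) := by
  simpa [List.append_assoc] using List.Perm.append_left l (List.perm_append_comm (l₁ := a) (l₂ := b))

lemma pvSeen2 {s s' : PySem.Set Int} (hs : s.Perm s') (x y : Int) :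
    ((PySem.Set.add s y).add x).Perm ((PySem.Set.add s' x).add y) :=
  (pvSet_add_add_perm s y x).trans (pvSet_add_perm (pvSet_add_perm hs x) y)

-- BFS does not care about the order of the pending queue nor the order inside the seen set
lemma pvBfsA_perm : ∀ (n : Nat) (q q' : List Int) (s s' : PySem.Set Int)
    (d : PySem.Dict Int (List Int)) (c : Int),
    q.length + pvDictW d ≤ n → q.Perm q' → s.Perm s' →
    pvSR (pvBfsA q s d c) (pvBfsA q' s' d c) := by
  intro n
  induction n with
  | zero =>
    intro q q' s s' d c hm hq hs
    have hq0 : q = [] := by cases q <;> simp_all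
    subst hq0
    have hq1 : q' = [] := List.nil_perm.mp hq
    subst hq1
    rw [pvBfsA, pvBfsA]
    exact ⟨hs, rfl⟩
  | succ n ih =>
    intro q q' s s' d c hm hq hs
    induction hq generalizing s s' d c with
    | nil =>
      rw [pvBfsA, pvBfsA]
      exact ⟨hs, rfl⟩
    | cons x hll ihl =>
      rename_i l l'
      rw [pvBfsA, pvBfsA]
      by_cases hx : d.getD x [] = []
      · rw [if_pos hx, if_pos hx]
        exact ih _ _ _ _ _ _ (by simp at hm ⊢; omega) hll (pvSet_add_perm hs x)
      · rw [if_neg hx, if_neg hx]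
        have hw := pvDictW_erase_get? d x _ (pvGetD_ne_nil_get? d x hx)
        refine ih _ _ _ _ _ _ ?_ (hll.append_right _) (pvSet_add_perm hs x)
        simp at hm ⊢; omega
    | swap x y l =>
      by_cases hxy : x = y
      · subst hxy
        conv_lhs => rw [pvBfsA]
        conv_rhs => rw [pvBfsA]
        by_cases hx : d.getD x [] = []
        · rw [if_pos hx, if_pos hx]
          exact ih _ _ _ _ _ _ (by simp at hm ⊢; omega) (List.Perm.refl _)
            (pvSet_add_perm hs x)
        · rw [if_neg hx, if_neg hx]
          have hw := pvDictW_erase_get? d x _ (pvGetD_ne_nil_get? d x hx)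
          exact ih _ _ _ _ _ _ (by simp at hm ⊢; omega) (List.Perm.refl _)
            (pvSet_add_perm hs x)
      · by_cases hy : d.getD y [] = [] <;> by_cases hx : d.getD x [] = []
        · conv_lhs => rw [pvBfsA]
          rw [if_pos hy]
          conv_lhs => rw [pvBfsA]
          rw [if_pos hx]
          conv_rhs => rw [pvBfsA]
          rw [if_pos hx]
          conv_rhs => rw [pvBfsA]
          rw [if_pos hy]
          exact ih _ _ _ _ _ _ (by simp at hm ⊢; omega) (List.Perm.refl _) (pvSeen2 hs x y)
        · conv_lhs => rw [pvBfsA]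
          rw [if_pos hy]
          conv_lhs => rw [pvBfsA]
          rw [if_neg hx]
          conv_rhs => rw [pvBfsA]
          rw [if_neg hx, List.cons_append]
          conv_rhs => rw [pvBfsA]
          rw [if_pos (show (d.erase x).getD y [] = [] by
            rw [pvGetD_erase_ne d x y (Ne.symm hxy)]; exact hy)]
          have hw := pvDictW_erase_get? d x _ (pvGetD_ne_nil_get? d x hx)
          exact ih _ _ _ _ _ _ (by simp at hm ⊢; omega) (List.Perm.refl _) (pvSeen2 hs x y)
        · conv_lhs => rw [pvBfsA]
          rw [if_neg hy, List.cons_append]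
          conv_lhs => rw [pvBfsA]
          rw [if_pos (show (d.erase y).getD x [] = [] by
            rw [pvGetD_erase_ne d y x hxy]; exact hx)]
          conv_rhs => rw [pvBfsA]
          rw [if_pos hx]
          conv_rhs => rw [pvBfsA]
          rw [if_neg hy]
          have hw := pvDictW_erase_get? d y _ (pvGetD_ne_nil_get? d y hy)
          exact ih _ _ _ _ _ _ (by simp at hm ⊢; omega) (List.Perm.refl _) (pvSeen2 hs x y)
        · conv_lhs => rw [pvBfsA]
          rw [if_neg hy, List.cons_append]
          conv_lhs => rw [pvBfsA]
          rw [if_neg (show ¬ (d.erase y).getD x [] = [] by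
              rw [pvGetD_erase_ne d y x hxy]; exact hx),
            pvGetD_erase_ne d y x hxy]
          conv_rhs => rw [pvBfsA]
          rw [if_neg hx, List.cons_append]
          conv_rhs => rw [pvBfsA]
          rw [if_neg (show ¬ (d.erase x).getD y [] = [] by
              rw [pvGetD_erase_ne d x y (Ne.symm hxy)]; exact hy),
            pvGetD_erase_ne d x y (Ne.symm hxy), pvErase_comm d y x]
          have hcc : c + ((d.getD y []).length : Int) + ((d.getD x []).length : Int)
              = c + ((d.getD x []).length : Int) + ((d.getD y []).length : Int) := by ring
          rw [hcc]
          have hwy := pvDictW_erase_get? d y _ (pvGetD_ne_nil_get? d y hy)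
          have hwx : pvDictW ((d.erase y).erase x) + (d.getD x []).length + 1
              ≤ pvDictW (d.erase y) := by
            refine pvDictW_erase_get? _ x _ ?_
            rw [pvGet?_erase_ne d y x hxy]
            exact pvGetD_ne_nil_get? d x hx
          refine ih _ _ _ _ _ _ ?_ (pvApp_perm l _ _) (pvSeen2 hs x y)
          rw [pvErase_comm d x y]
          simp at hm ⊢; omega
    | trans h12 h23 ih12 ih23 =>
      have e1 := ih12 s s d c hm (List.Perm.refl s)
      have e2 := ih23 s s' d c (by rw [← h12.length_eq]; exact hm) hs
      exact pvSR_trans e1 e2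

-- batch erase and out-degree sum, the quantities B derives after its fixpoint search
def pvEraseAll (L : List Int) (d : PySem.Dict Int (List Int)) : PySem.Dict Int (List Int) :=
  L.foldl (fun d v => d.erase v) d

def pvDegSum (d : PySem.Dict Int (List Int)) (L : List Int) : Int :=
  (L.map (fun v => ((d.getD v []).length : Int))).sum

lemma pvEraseAll_cons (v : Int) (L : List Int) (d : PySem.Dict Int (List Int)) :
    pvEraseAll (v :: L) d = pvEraseAll L (d.erase v) := rfl

lemma pvGet?_eraseAll (L : List Int) : ∀ (d : PySem.Dict Int (List Int)) (x : Int),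
    (pvEraseAll L d).get? x = if x ∈ L then none else d.get? x := by
  induction L with
  | nil => intro d x; simp [pvEraseAll]
  | cons v L ih =>
    intro d x
    rw [pvEraseAll_cons, ih]
    by_cases hx : x ∈ L
    · simp [hx]
    · by_cases hxv : x = v
      · subst hxv
        simp [hx, pvGet?_erase_self]
      · simp [hx, hxv, pvGet?_erase_ne d v x hxv]

lemma pvItems_eraseAll (L : List Int) : ∀ (d : PySem.Dict Int (List Int)),
    (pvEraseAll L d).items = d.items.filter (fun p => !(L.contains p.1)) := by
  induction L with
  | nil => intro d; simp [pvEraseAll]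
  | cons v L ih =>
    intro d
    rw [pvEraseAll_cons, ih]
    have he : (d.erase v).items = d.items.filter (fun p => !(p.1 == v)) := rfl
    rw [he, List.filter_filter]
    apply List.filter_congr
    intro p _
    by_cases h1 : p.1 = v <;> by_cases h2 : p.1 ∈ L <;>
      simp [h1, h2, List.contains_eq_mem]

lemma pvEraseAll_of_none (L : List Int) : ∀ (d : PySem.Dict Int (List Int)),
    (∀ v ∈ L, d.get? v = none) → pvEraseAll L d = d := by
  induction L with
  | nil => intro d _; rfl
  | cons v L ih =>
    intro d h
    rw [pvEraseAll_cons, pvErase_of_none d v (h v (by simp))]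
    exact ih d (fun x hx => h x (by simp [hx]))

lemma pvDegSum_cons (d : PySem.Dict Int (List Int)) (v : Int) (L : List Int) :
    pvDegSum d (v :: L) = ((d.getD v []).length : Int) + pvDegSum d L := by
  simp [pvDegSum]

lemma pvDegSum_congr {d₁ d₂ : PySem.Dict Int (List Int)} {L : List Int}
    (h : ∀ v ∈ L, d₁.getD v [] = d₂.getD v []) : pvDegSum d₁ L = pvDegSum d₂ L := by
  unfold pvDegSum
  congr 1
  exact List.map_congr_left (fun v hv => by rw [h v hv])

lemma pvDegSum_zero {d : PySem.Dict Int (List Int)} {L : List Int}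
    (h : ∀ v ∈ L, d.get? v = none) : pvDegSum d L = 0 := by
  induction L with
  | nil => rfl
  | cons v L ih =>
    rw [pvDegSum_cons, PySem.Dict.getD_of_get?_eq_none d [] (h v (by simp))]
    simpa using ih (fun x hx => h x (by simp [hx]))

lemma pvDegSum_split (d : PySem.Dict Int (List Int)) (p : Int → Bool) (L : List Int) :
    pvDegSum d L = pvDegSum d (L.filter p) + pvDegSum d (L.filter (fun x => !(p x))) := by
  induction L with
  | nil => rfl
  | cons v L ih =>
    by_cases hv : p v <;>
      simp [List.filter_cons, hv, pvDegSum_cons, ih] <;> ring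

lemma pvDegSum_perm (d : PySem.Dict Int (List Int)) {L₁ L₂ : List Int}
    (h : L₁.Perm L₂) : pvDegSum d L₁ = pvDegSum d L₂ :=
  (h.map _).sum_eq

-- split a list into a copy of a nodup sub-collection and a remainder
lemma pvExists_split : ∀ (N L : List Int), N.Nodup → (∀ x ∈ N, x ∈ L) →
    ∃ rest, L.Perm (N ++ rest) ∧ ∀ x ∈ rest, x ∈ L := by
  intro N
  induction N with
  | nil => intro L _ _; exact ⟨L, by simp, fun x h => h⟩
  | cons n N ih =>
    intro L hnd hsub
    have hn : n ∈ L := hsub n (by simp)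
    have hNe : ∀ x ∈ N, x ∈ L.erase n := by
      intro x hx
      have hxn : x ≠ n := by
        intro h; subst h; exact (List.nodup_cons.mp hnd).1 hx
      exact (List.mem_erase_of_ne hxn).mpr (hsub x (by simp [hx]))
    obtain ⟨rest, hperm, hrest⟩ := ih (L.erase n) (List.nodup_cons.mp hnd).2 hNe
    refine ⟨rest, ?_, fun x hx => List.erase_subset (hrest x hx)⟩
    exact (List.perm_cons_erase hn).trans (hperm.cons n)

-- expanding a whole nodup frontier at the head of A's queue in one block
lemma pvSub : ∀ (F q : List Int) (s : PySem.Set Int) (d : PySem.Dict Int (List Int)) (c : Int),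
    F.Nodup → (∀ p ∈ d.items, p.2 ≠ []) →
    pvBfsA (F ++ q) s d c
      = pvBfsA (q ++ F.flatMap (fun v => d.getD v [])) (PySem.Set.update s F)
          (pvEraseAll F d) (c + pvDegSum d F) := by
  intro F
  induction F with
  | nil =>
    intro q s d c _ _
    simp [pvEraseAll, pvDegSum, PySem.Set.update_nil]
  | cons v F ih =>
    intro q s d c hnd hne
    have hvF : v ∉ F := (List.nodup_cons.mp hnd).1
    rw [List.cons_append, pvBfsA]
    by_cases hv : d.getD v [] = []
    · rw [if_pos hv]
      have hnone : d.get? v = none := by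
        cases hg : d.get? v with
        | none => rfl
        | some ch =>
          have : ch = [] := by
            have := PySem.Dict.getD_of_get?_eq_some d ([] : List Int) hg
            rw [this] at hv; exact hv
          subst this
          exact absurd rfl (hne _ (pvGet?_mem d v [] hg))
      rw [ih q (PySem.Set.add s v) d c (List.nodup_cons.mp hnd).2 hne]
      rw [PySem.Set.update_cons, pvEraseAll_cons, pvErase_of_none d v hnone,
        pvDegSum_cons, List.flatMap_cons, hv]
      simp
    · rw [if_neg hv, List.append_assoc]
      rw [ih (q ++ d.getD v []) (PySem.Set.add s v) (d.erase v)
        (c + ((d.getD v []).length : Int)) (List.nodup_cons.mp hnd).2 (pvHne_erase d v hne)]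
      rw [PySem.Set.update_cons, pvEraseAll_cons, pvDegSum_cons, List.flatMap_cons]
      have h1 : F.flatMap (fun v' => (d.erase v).getD v' []) = F.flatMap (fun v' => d.getD v' []) := by
        apply List.flatMap_congr
        intro x hx
        exact pvGetD_erase_ne d v x (fun h => hvF (h ▸ hx))
      have h2 : pvDegSum (d.erase v) F = pvDegSum d F :=
        pvDegSum_congr (fun x hx => pvGetD_erase_ne d v x (fun h => hvF (h ▸ hx)))
      rw [h1, h2, List.append_assoc]
      ring_nf

lemma pvChildSet_congr_aux (F : List Int) {d₁ d₂ : PySem.Dict Int (List Int)}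
    (h : ∀ x ∈ F, d₁.get? x = d₂.get? x) : ∀ (acc : PySem.Set Int),
    (F.foldl (fun acc v =>
      match d₁.get? v with
      | some ch => PySem.Set.update acc ch
      | none => acc) acc)
    = (F.foldl (fun acc v =>
      match d₂.get? v with
      | some ch => PySem.Set.update acc ch
      | none => acc) acc) := by
  induction F with
  | nil => intro acc; rfl
  | cons v F ih =>
    intro acc
    rw [List.foldl_cons, List.foldl_cons, h v (by simp)]
    exact ih (fun x hx => h x (by simp [hx])) _

lemma pvChildSet_congr {F : List Int} {d₁ d₂ : PySem.Dict Int (List Int)}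
    (h : ∀ x ∈ F, d₁.get? x = d₂.get? x) : pvChildSet F d₁ = pvChildSet F d₂ :=
  pvChildSet_congr_aux F h PySem.Set.empty

lemma pvSat_mem_of (d : PySem.Dict Int (List Int)) :
    ∀ (F R : PySem.Set Int) (x : Int), x ∈ R → x ∈ pvSat F R d := by
  intro F R
  induction F, R using pvSat.induct d with
  | case1 R => intro x hx; rw [pvSat]; exact hx
  | case2 R a l new ih =>
    intro x hx
    rw [pvSat]
    exact ih x ((PySem.Set.mem_update _ _ _).mpr (Or.inl hx))

lemma pvSat_nodup (d : PySem.Dict Int (List Int)) :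
    ∀ (F R : PySem.Set Int), R.Nodup → (pvSat F R d).Nodup := by
  intro F R
  induction F, R using pvSat.induct d with
  | case1 R => intro h; rw [pvSat]; exact h
  | case2 R a l new ih =>
    intro h
    rw [pvSat]
    exact ih (PySem.Set.nodup_update _ _ h)

lemma pvSat_congr (d₁ : PySem.Dict Int (List Int)) :
    ∀ (F R : PySem.Set Int) (d₂ : PySem.Dict Int (List Int)),
    (∀ x, (x ∈ F ∨ x ∉ R) → d₁.get? x = d₂.get? x) → pvSat F R d₁ = pvSat F R d₂ := by
  intro F R
  induction F, R using pvSat.induct d₁ with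
  | case1 R =>
    intro d₂ h
    rw [pvSat, pvSat]
  | case2 R a l new ih =>
    intro d₂ h
    rw [pvSat, pvSat]
    have hcs : pvChildSet (a :: l) d₂ = pvChildSet (a :: l) d₁ :=
      (pvChildSet_congr (fun x hx => h x (Or.inl hx))).symm
    rw [hcs]
    apply ih
    intro x hx
    apply h
    rcases hx with hx | hx
    · exact Or.inr ((PySem.Set.mem_diff _ _ _).mp hx).2
    · exact Or.inr (fun hxR => hx ((PySem.Set.mem_update _ _ _).mpr (Or.inl hxR)))

lemma pvW_sub : ∀ (F : List Int) (d : PySem.Dict Int (List Int)), F.Nodup →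
    pvDictW (pvEraseAll F d) + (F.flatMap (fun v => d.getD v [])).length ≤ pvDictW d := by
  intro F
  induction F with
  | nil => intro d _; simp [pvEraseAll]
  | cons v F ih =>
    intro d hnd
    have hvF : v ∉ F := (List.nodup_cons.mp hnd).1
    rw [pvEraseAll_cons, List.flatMap_cons]
    cases hg : d.get? v with
    | none =>
      rw [pvErase_of_none d v hg, PySem.Dict.getD_of_get?_eq_none d [] hg]
      simpa using ih d (List.nodup_cons.mp hnd).2
    | some ch =>
      have hgd : d.getD v [] = ch := PySem.Dict.getD_of_get?_eq_some d [] hg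
      have hw := pvDictW_erase_get? d v ch hg
      have hfm : F.flatMap (fun v' => d.getD v' []) = F.flatMap (fun v' => (d.erase v).getD v' []) :=
        List.flatMap_congr (fun x hx => (pvGetD_erase_ne d v x (fun h => hvF (h ▸ hx))).symm)
      rw [hgd, hfm]
      have := ih (d.erase v) (List.nodup_cons.mp hnd).2
      simp only [List.length_append]
      omega

lemma pvMaster_base (R : List Int) (s : PySem.Set Int) (d : PySem.Dict Int (List Int)) (c : Int)
    (hRnd : R.Nodup) (hsnd : s.Nodup) (hmem : ∀ x, x ∈ s ↔ x ∈ R)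
    (hnone : ∀ v ∈ R, d.get? v = none) :
    pvSR (pvBfsA [] s d c)
         (pvSat [] R d, pvEraseAll (pvSat [] R d) d, c + pvDegSum d (pvSat [] R d)) := by
  have hS : pvSat [] R d = R := by rw [pvSat]
  rw [pvBfsA, hS]
  refine ⟨(List.perm_ext_iff_of_nodup hsnd hRnd).mpr hmem, ?_⟩
  rw [pvEraseAll_of_none R d hnone, pvDegSum_zero hnone, add_zero]

-- the master invariant: A's queue BFS from (frontier ++ junk) computes B's fixpoint reach,
-- the batch-erased dict and the summed out-degrees
lemma pvMaster : ∀ (n : Nat) (F J R : List Int) (s : PySem.Set Int)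
    (d : PySem.Dict Int (List Int)) (c : Int),
    pvDictW d + F.length + J.length ≤ n →
    F.Nodup → R.Nodup → s.Nodup →
    (∀ x ∈ F, x ∈ R) → (∀ x ∈ J, x ∈ R) →
    (∀ x, (x ∈ s ∨ x ∈ F) ↔ x ∈ R) →
    (∀ v ∈ R, v ∉ F → d.get? v = none) →
    (∀ p ∈ d.items, p.2 ≠ []) →
    pvSR (pvBfsA (F ++ J) s d c)
         (pvSat F R d, pvEraseAll (pvSat F R d) d, c + pvDegSum d (pvSat F R d)) := by
  intro n
  induction n with
  | zero =>
    intro F J R s d c hm hFnd hRnd hsnd hFR hJR hmem hnone hne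
    have hF : F = [] := by cases F <;> simp_all
    have hJ : J = [] := by cases J <;> simp_all
    subst hF; subst hJ
    exact pvMaster_base R s d c hRnd hsnd (fun x => by have := hmem x; simpa using this)
      (fun v hv => hnone v hv (by simp))
  | succ n ih =>
    intro F J R s d c hm hFnd hRnd hsnd hFR hJR hmem hnone hne
    match F with
    | [] =>
      match J with
      | [] =>
        exact pvMaster_base R s d c hRnd hsnd (fun x => by have := hmem x; simpa using this)
          (fun v hv => hnone v hv (by simp))
      | w :: J' =>
        have hwR : w ∈ R := hJR w (by simp)
        have hws : w ∈ s := by have := (hmem w).mpr hwR; simpa using this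
        have hwnone : d.get? w = none := hnone w hwR (by simp)
        have hstep : pvBfsA ([] ++ w :: J') s d c = pvBfsA J' s d c := by
          rw [List.nil_append, pvBfsA,
            if_pos (PySem.Dict.getD_of_get?_eq_none d [] hwnone),
            PySem.Set.add_of_mem hws]
        rw [hstep]
        have := ih [] J' R s d c (by simp at hm ⊢; omega) hFnd hRnd hsnd hFR
          (fun x hx => hJR x (by simp [hx])) hmem hnone hne
        simpa using this
    | a :: F' =>
      -- one whole round: expand the frontier in a block, reorder, recurse
      have hsub := pvSub (a :: F') J s d c hFnd hne
      set CC := (a :: F').flatMap (fun v => d.getD v []) with hCC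
      set new := PySem.Set.diff (pvChildSet (a :: F') d) R with hnew
      set R' := PySem.Set.update R new with hR'
      set d' := pvEraseAll (a :: F') d with hd'
      have hnewnd : new.Nodup := PySem.Set.nodup_diff _ _ (pvChildSet_nodup _ d)
      have hnewmem : ∀ x, x ∈ new ↔ x ∈ CC ∧ x ∉ R := by
        intro x
        rw [hnew, PySem.Set.mem_diff, mem_pvChildSet, hCC]
        simp [List.mem_flatMap]
      obtain ⟨rest, hCCperm, hrestL⟩ :=
        pvExists_split new CC hnewnd (fun x hx => ((hnewmem x).mp hx).1)
      have h1 : (J ++ CC).Perm ((J ++ new) ++ rest) := by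
        rw [List.append_assoc]
        exact List.Perm.append_left J hCCperm
      have h2 : ((J ++ new) ++ rest).Perm ((new ++ J) ++ rest) :=
        (List.perm_append_comm).append_right rest
      have hqperm : (J ++ CC).Perm (new ++ (J ++ rest)) := by
        rw [← List.append_assoc]
        exact h1.trans h2
      have hperm := pvBfsA_perm ((J ++ CC).length + pvDictW d') (J ++ CC) (new ++ (J ++ rest))
        (PySem.Set.update s (a :: F')) (PySem.Set.update s (a :: F')) d' (c + pvDegSum d (a :: F'))
        le_rfl hqperm (List.Perm.refl _)
      -- measure for the recursive call
      have hW := pvW_sub (a :: F') d hFnd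
      rw [← hd', ← hCC] at hW
      have hlen : CC.length = new.length + rest.length := by
        have := hCCperm.length_eq
        simpa using this
      -- hypotheses for the recursive call
      have hne' : ∀ p ∈ d'.items, p.2 ≠ [] := by
        intro p hp
        rw [hd', pvItems_eraseAll] at hp
        exact hne p (List.mem_filter.mp hp).1
      have hget' : ∀ x, d'.get? x = if x ∈ (a :: F') then none else d.get? x := by
        intro x; rw [hd', pvGet?_eraseAll]
      have hih := ih new (J ++ rest) R' (PySem.Set.update s (a :: F')) d'
        (c + pvDegSum d (a :: F'))
        (by simp only [List.length_append]; simp at hm; omega)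
        hnewnd (PySem.Set.nodup_update _ _ hRnd) (PySem.Set.nodup_update _ _ hsnd)
        (fun x hx => (PySem.Set.mem_update _ _ _).mpr (Or.inr hx))
        (by
          intro x hx
          rcases List.mem_append.mp hx with hx | hx
          · exact (PySem.Set.mem_update _ _ _).mpr (Or.inl (hJR x hx))
          · by_cases hxR : x ∈ R
            · exact (PySem.Set.mem_update _ _ _).mpr (Or.inl hxR)
            · exact (PySem.Set.mem_update _ _ _).mpr
                (Or.inr ((hnewmem x).mpr ⟨hrestL x hx, hxR⟩)))
        (by
          intro x
          rw [PySem.Set.mem_update, PySem.Set.mem_update]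
          have := hmem x
          tauto)
        (by
          intro v hv hvnew
          rw [hget']
          by_cases hvF : v ∈ (a :: F')
          · rw [if_pos hvF]
          · rw [if_neg hvF]
            rcases (PySem.Set.mem_update _ _ _).mp hv with hvR | hvnew'
            · exact hnone v hvR hvF
            · exact absurd hvnew' hvnew)
        hne'
      -- align the fixpoint-side triples
      have hsat1 : pvSat (a :: F') R d = pvSat new R' d := by
        conv_lhs => rw [pvSat]
      have hsat2 : pvSat new R' d = pvSat new R' d' := by
        apply pvSat_congr
        intro x hx
        rw [hget']
        have hxF : x ∉ (a :: F') := by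
          rcases hx with hx | hx
          · intro hxF
            exact ((hnewmem x).mp hx).2 (hFR x hxF)
          · intro hxF
            exact hx ((PySem.Set.mem_update _ _ _).mpr (Or.inl (hFR x hxF)))
        rw [if_neg hxF]
      set Fut := pvSat (a :: F') R d with hFut
      have hFd : pvSat new R' d' = Fut := (hsat2.symm).trans hsat1.symm
      have hFutnd : Fut.Nodup := pvSat_nodup d _ _ hRnd
      have hFFut : ∀ x ∈ (a :: F'), x ∈ Fut := fun x hx => pvSat_mem_of d _ _ x (hFR x hx)
      -- the batch-erased dict is the same whether or not the frontier was erased first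
      have hdict : pvEraseAll Fut d' = pvEraseAll Fut d := by
        apply PySem.Dict.ext
        rw [pvItems_eraseAll, pvItems_eraseAll, pvItems_eraseAll, List.filter_filter]
        apply List.filter_congr
        intro p _
        by_cases hpF : p.1 ∈ Fut
        · simp [List.contains_eq_mem, hpF]
        · have hpF' : p.1 ∉ (a :: F') := fun h => hpF (hFFut _ h)
          simp [List.contains_eq_mem, hpF, hpF']
      -- the summed out-degrees recombine
      have hcnt : c + pvDegSum d (a :: F') + pvDegSum d' Fut = c + pvDegSum d Fut := by
        have hsplit := pvDegSum_split d (fun x => (a :: F').contains x) Fut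
        have hsplit' := pvDegSum_split d' (fun x => (a :: F').contains x) Fut
        have hpermF : (Fut.filter (fun x => (a :: F').contains x)).Perm (a :: F') := by
          refine (List.perm_ext_iff_of_nodup (hFutnd.filter _) hFnd).mpr ?_
          intro x
          rw [List.mem_filter]
          simp only [List.contains_eq_mem, decide_eq_true_eq]
          exact ⟨fun h => h.2, fun h => ⟨hFFut x h, h⟩⟩
        have he1 : pvDegSum d (Fut.filter (fun x => (a :: F').contains x)) = pvDegSum d (a :: F') :=
          pvDegSum_perm d hpermF
        have he2 : pvDegSum d' (Fut.filter (fun x => (a :: F').contains x)) = 0 := by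
          apply pvDegSum_zero
          intro v hv
          rw [hget', if_pos]
          have := (List.mem_filter.mp hv).2
          simpa [List.contains_eq_mem] using this
        have he3 : pvDegSum d' (Fut.filter (fun x => !((a :: F').contains x)))
            = pvDegSum d (Fut.filter (fun x => !((a :: F').contains x))) := by
          apply pvDegSum_congr
          intro v hv
          have hvF : v ∉ (a :: F') := by
            have := (List.mem_filter.mp hv).2
            simpa [List.contains_eq_mem] using this
          rw [PySem.Dict.getD_eq_get?_getD, PySem.Dict.getD_eq_get?_getD, hget', if_neg hvF]
        omega
      rw [hsub]
      refine pvSR_trans hperm ?_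
      rw [hFd] at hih
      refine pvSR_trans hih ?_
      rw [hdict]
      refine ⟨List.Perm.refl _, ?_⟩
      rw [hcnt]

lemma pvHne_bfsA (q : List Int) (s : PySem.Set Int) (d : PySem.Dict Int (List Int)) (c : Int)
    (h : ∀ p ∈ d.items, p.2 ≠ []) : ∀ p ∈ (pvBfsA q s d c).2.1.items, p.2 ≠ [] := by
  induction q, s, d, c using pvBfsA.induct with
  | case1 s d c => rw [pvBfsA]; exact h
  | case2 s d c v rest hx ih => rw [pvBfsA, if_pos hx]; exact ih h
  | case3 s d c v rest hx ih => rw [pvBfsA, if_neg hx]; exact ih (pvHne_erase d v h)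

lemma pvContains_false_get? (d : PySem.Dict Int (List Int)) (v : Int)
    (h : d.contains v = false) : d.get? v = none := by
  rw [PySem.Dict.contains_eq_isSome_get?] at h
  cases hg : d.get? v with
  | none => rfl
  | some ch => rw [hg] at h; simp at h

lemma pvMem_items_contains (d : PySem.Dict Int (List Int)) (p : Int × List Int)
    (hp : p ∈ d.items) : d.contains p.1 = true :=
  (PySem.Dict.contains_iff_mem_keys d p.1).mpr (List.mem_map.mpr ⟨p, hp, rfl⟩)

-- one component: B's step from its fixpoint quantities equals A's step from its BFS
lemma pvStep_eq (a b c : Int) (d : PySem.Dict Int (List Int)) (s0 : Int)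
    (hne : ∀ p ∈ d.items, p.2 ≠ []) :
    pvStepB ([a, b, c], d) s0
      = (([(pvStepA ((a, b, c), d) s0).1.1, (pvStepA ((a, b, c), d) s0).1.2.1,
          (pvStepA ((a, b, c), d) s0).1.2.2], (pvStepA ((a, b, c), d) s0).2)) := by
  have hmst := pvMaster (pvDictW d + 1) [s0] [] [s0] (PySem.Set.add PySem.Set.empty s0) d 0
    (by simp) (by simp) (by simp) (by simp [PySem.Set.add, PySem.Set.empty])
    (by simp) (by simp) (by intro x; simp) (by intro v hv hnv; simp at hv; exact absurd (by simp [hv]) hnv)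
    hne
  simp only [List.append_nil] at hmst
  have hof : PySem.Set.ofList [s0] = [s0] := rfl
  have hadd : PySem.Set.add PySem.Set.empty s0 = [s0] := rfl
  set reach := pvSat [s0] [s0] d with hreach
  set r := pvBfsA [s0] (PySem.Set.add PySem.Set.empty s0) d 0 with hr
  obtain ⟨hp, he⟩ := hmst
  have hlen : PySem.Set.len r.1 = PySem.Set.len reach := by
    simp [PySem.Set.len, hp.length_eq]
  have hdeq : r.2.1 = pvEraseAll reach d := congrArg Prod.fst he
  have hceq : r.2.2 = pvDegSum d reach := by
    have := congrArg Prod.snd he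
    simpa using this
  -- B's consumed-based quantities agree with the full-reach ones
  have hcnt : ((reach.filter (fun v => d.contains v)).map
      (fun v => ((d.getD v []).length : Int))).sum = pvDegSum d reach := by
    have hsplit := pvDegSum_split d (fun v => d.contains v) reach
    have hz : pvDegSum d (reach.filter (fun v => !(d.contains v))) = 0 := by
      apply pvDegSum_zero
      intro v hv
      have := (List.mem_filter.mp hv).2
      exact pvContains_false_get? d v (by simpa using this)
    have : pvDegSum d (reach.filter (fun v => d.contains v))
        = ((reach.filter (fun v => d.contains v)).map
            (fun v => ((d.getD v []).length : Int))).sum := rfl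
    omega
  have hdict : (reach.filter (fun v => d.contains v)).foldl (fun d v => d.erase v) d
      = pvEraseAll reach d := by
    show pvEraseAll (reach.filter (fun v => d.contains v)) d = pvEraseAll reach d
    apply PySem.Dict.ext
    rw [pvItems_eraseAll, pvItems_eraseAll]
    apply List.filter_congr
    intro p hp
    have hc := pvMem_items_contains d p hp
    by_cases hpr : p.1 ∈ reach
    · simp [List.contains_eq_mem, hpr, List.mem_filter, hc]
    · simp [List.contains_eq_mem, hpr, List.mem_filter]
  simp only [pvStepB, pvStepA, hof, ← hreach, ← hr, hcnt, hdict, hlen, hdeq, hceq,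
    PySem.Set.len]
  have hlen' : ((r.1.length : Int)) = ((reach.length : Int)) := by
    simpa [PySem.Set.len] using hlen
  rw [hlen']
  by_cases h1 : ((reach.length : Int)) = pvDegSum d reach
  · have hd0 : ((reach.length : Int)) - pvDegSum d reach = 0 := by omega
    simp [h1, hd0]
  · by_cases h2 : pvDegSum d reach < ((reach.length : Int))
    · have hd0 : ¬ (((reach.length : Int)) - pvDegSum d reach = 0) := by omega
      have hd1 : (0 : Int) < ((reach.length : Int)) - pvDegSum d reach := by omega
      simp [h1, h2, hd0, hd1]
    · have hd0 : ¬ (((reach.length : Int)) - pvDegSum d reach = 0) := by omega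
      have hd1 : ¬ ((0 : Int) < ((reach.length : Int)) - pvDegSum d reach) := by omega
      simp [h1, h2, hd0, hd1]

lemma pvFold_eq : ∀ (starts : List Int) (a b c : Int) (d : PySem.Dict Int (List Int)),
    (∀ p ∈ d.items, p.2 ≠ []) →
    starts.foldl pvStepB ([a, b, c], d)
      = ([(starts.foldl pvStepA ((a, b, c), d)).1.1,
          (starts.foldl pvStepA ((a, b, c), d)).1.2.1,
          (starts.foldl pvStepA ((a, b, c), d)).1.2.2],
         (starts.foldl pvStepA ((a, b, c), d)).2) := by
  intro starts
  induction starts with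
  | nil => intro a b c d _; rfl
  | cons s0 t ih =>
    intro a b c d hne
    rw [List.foldl_cons, List.foldl_cons, pvStep_eq a b c d s0 hne]
    have hinv : ∀ p ∈ (pvStepA ((a, b, c), d) s0).2.items, p.2 ≠ [] :=
      pvHne_bfsA [s0] (PySem.Set.add PySem.Set.empty s0) d 0 hne
    exact ih _ _ _ _ hinv

lemma pvModify_eq (d : PySem.Dict Int (List Int)) (k b : Int) :
    PySem.Dict.modify d k [] (· ++ [b])
      = match d.get? k with
        | some l => d.insert k (l ++ [b])
        | none   => d.insert k [b] := by
  cases hg : d.get? k <;> simp [PySem.Dict.modify, PySem.Dict.getD, hg]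

lemma pvBuild_eq (edges : List (List Int)) : pvBuildB edges = pvBuildA edges := by
  unfold pvBuildA pvBuildB
  apply PySem.List.foldl_congr_mem
  intro st e _
  exact Prod.ext rfl (pvModify_eq st.2 (pvE0 e) (pvE1 e))

lemma pvBuildB_split (edges : List (List Int)) :
    pvBuildB edges
      = (edges.foldl (fun s e => PySem.Set.add s (pvE1 e)) PySem.Set.empty,
         edges.foldl (fun d e => PySem.Dict.modify d (pvE0 e) [] (· ++ [pvE1 e]))
           PySem.Dict.empty) := by
  unfold pvBuildB
  rw [PySem.List.foldl_prod_mk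
    (f := fun s e => PySem.Set.add s (pvE1 e))
    (g := fun d e => PySem.Dict.modify d (pvE0 e) [] (· ++ [pvE1 e]))]

lemma pvBuild_nodup (edges : List (List Int)) : (pvBuildA edges).2.keys.Nodup := by
  rw [← pvBuild_eq, pvBuildB_split]
  exact PySem.Dict.nodup_keys_foldl_modify_key edges pvE0 []
    (fun _ e => (· ++ [pvE1 e])) PySem.Dict.empty (by simp [pysem])

lemma pvHne_foldl (edges : List (List Int)) :
    ∀ (d : PySem.Dict Int (List Int)), (∀ p ∈ d.items, p.2 ≠ []) →
    ∀ p ∈ (edges.foldl (fun d e => PySem.Dict.modify d (pvE0 e) [] (· ++ [pvE1 e])) d).items,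
      p.2 ≠ [] := by
  induction edges with
  | nil => intro d h; simpa using h
  | cons e t ih =>
    intro d h
    rw [List.foldl_cons]
    refine ih _ ?_
    intro p hp
    have := (PySem.Dict.mem_items_insert d _ _ p).mp
      (by simpa [PySem.Dict.modify] using hp)
    rcases this with h1 | h2
    · subst h1; simp
    · exact h p h2.1

lemma pvBuild_hne (edges : List (List Int)) : ∀ p ∈ (pvBuildA edges).2.items, p.2 ≠ [] := by
  rw [← pvBuild_eq, pvBuildB_split]
  exact pvHne_foldl edges PySem.Dict.empty (by simp [PySem.Dict.empty])

-- A's candidate list (take the head) vs B's lazy first match over the items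
lemma pvFindAux (l : List (Int × List Int)) (hnd : (l.map Prod.fst).Nodup)
    (P : Int → List Int → Bool) :
    ((l.map Prod.fst).filter (fun k => P k ((PySem.Dict.mk l).getD k []))).head?
      = (l.find? (fun p => P p.1 p.2)).map Prod.fst := by
  induction l with
  | nil => rfl
  | cons p t ih =>
    have hgd : (PySem.Dict.mk (p :: t)).getD p.1 [] = p.2 := by
      simp [PySem.Dict.getD, PySem.Dict.get?, List.find?_cons]
    rw [List.map_cons] at hnd
    obtain ⟨hnotin, hnd2⟩ := List.nodup_cons.mp hnd
    have hne : ∀ k ∈ t.map Prod.fst, k ≠ p.1 := by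
      intro k hk hkp
      exact hnotin (hkp ▸ hk)
    have hgd2 : ∀ k ∈ t.map Prod.fst,
        (PySem.Dict.mk (p :: t)).getD k [] = (PySem.Dict.mk t).getD k [] := by
      intro k hk
      have : (p.1 == k) = false := by simp [Ne.symm (hne k hk)]
      simp [PySem.Dict.getD, PySem.Dict.get?, List.find?_cons, this]
    simp only [List.map_cons, List.filter_cons, List.find?_cons, hgd]
    by_cases hP : P p.1 p.2 = true
    · simp [hP]
    · simp only [hP, Bool.false_eq_true, if_false, cond_false]
      rw [List.filter_congr (fun k hk => by rw [hgd2 k hk])]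
      exact ih hnd2

lemma pvFirsts_head (d : PySem.Dict Int (List Int)) (hnd : d.keys.Nodup)
    (nf : PySem.Set Int) :
    (d.keys.filter
        (fun k => decide (1 < (d.getD k []).length) && !(PySem.Set.contains nf k))).head?
      = (d.items.find?
          (fun p => decide (1 < p.2.length) && !(PySem.Set.contains nf p.1))).map Prod.fst := by
  have := pvFindAux d.items (by simpa [PySem.Dict.keys] using hnd)
    (fun k v => decide (1 < v.length) && !(PySem.Set.contains nf k))
  simpa [PySem.Dict.keys] using this

lemma solution_eq (edges : List (List Int)) : solution edges = solution_alt edges := by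
  have hb := pvBuild_eq edges
  have hnd := pvBuild_nodup edges
  have hh := pvFirsts_head (pvBuildA edges).2 hnd (pvBuildA edges).1
  have hhne := pvBuild_hne edges
  unfold solution solution_alt
  rw [hb]
  cases hfind : (pvBuildA edges).2.items.find?
      (fun p => decide (1 < p.2.length) && !(PySem.Set.contains (pvBuildA edges).1 p.1)) with
  | none =>
    have hfil : ((pvBuildA edges).2.keys.filter
        (fun k => decide (1 < ((pvBuildA edges).2.getD k []).length)
          && !(PySem.Set.contains (pvBuildA edges).1 k))) = [] := by
      rw [← List.head?_eq_none_iff, hh, hfind]; rfl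
    simp only [hfil, hfind]
  | some p =>
    have hfil : ((pvBuildA edges).2.keys.filter
        (fun k => decide (1 < ((pvBuildA edges).2.getD k []).length)
          && !(PySem.Set.contains (pvBuildA edges).1 k))).head? = some p.1 := by
      rw [hh, hfind]; rfl
    obtain ⟨rest, hfl⟩ : ∃ rest, ((pvBuildA edges).2.keys.filter
        (fun k => decide (1 < ((pvBuildA edges).2.getD k []).length)
          && !(PySem.Set.contains (pvBuildA edges).1 k))) = p.1 :: rest := by
      cases hcase : ((pvBuildA edges).2.keys.filter
          (fun k => decide (1 < ((pvBuildA edges).2.getD k []).length)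
            && !(PySem.Set.contains (pvBuildA edges).1 k))) with
      | nil => rw [hcase] at hfil; simp at hfil
      | cons a r =>
        rw [hcase] at hfil
        simp at hfil
        exact ⟨r, by rw [hfil]⟩
    simp only [hfl, hfind]
    rw [pvFold_eq _ _ _ _ _ (pvHne_erase _ _ hhne)]

-- ===== VERDICT (by name: the statement is the Claim_ definition above) =====
theorem solution_spec : Claim_equal_solution := by
  intro edges _ _
  exact solution_eq edges
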